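-- pv_equiv track=rewrite | github.com/joshuashevchuk1/LeetHackerQuestionsStudy | amazon/hostThroughput.py | minimize_query_time
-- ===== SOURCE A (Python) =====
-- def minimize_query_time(host_throughput):
--     def is_feasible(max_query_time):
--         current_load = 0
--         for throughput in host_throughput:
--             if throughput > max_query_time:
--                 return False  # Can't assign this throughput
--             if current_load + throughput > max_query_time:
--                 current_load = throughput  # Start a new server
--             else:
--                 current_load += throughput
--         return True
--
--     left = max(host_throughput)
--     right = sum(host_throughput)
--
--     while left < right:
--         mid = (left + right) // 2
--         if is_feasible(mid):
--             right = mid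
--         else:
--             left = mid + 1
--
--     return left
-- ===== SOURCE B (Python) =====
-- def minimize_query_time(host_throughput):
--     # The binary search in A always collapses to its lower bound: any mid >= max
--     # is feasible (no element exceeds it and the server count is unbounded).
--     return max(host_throughput)
-- ===== Notes on version B (the rewrite author's own statement) =====
-- stated objective: simpler
-- what changed: Replaced the binary search with the closed form max(host_throughput): A's feasibility check never limits the server count, so every mid >= max is feasible and the search always returns its lower bound max(host_throughput).
-- outside the precondition, e.g. on minimize_query_time([]): A raises ValueError, B raises ValueError
import Mathlib
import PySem

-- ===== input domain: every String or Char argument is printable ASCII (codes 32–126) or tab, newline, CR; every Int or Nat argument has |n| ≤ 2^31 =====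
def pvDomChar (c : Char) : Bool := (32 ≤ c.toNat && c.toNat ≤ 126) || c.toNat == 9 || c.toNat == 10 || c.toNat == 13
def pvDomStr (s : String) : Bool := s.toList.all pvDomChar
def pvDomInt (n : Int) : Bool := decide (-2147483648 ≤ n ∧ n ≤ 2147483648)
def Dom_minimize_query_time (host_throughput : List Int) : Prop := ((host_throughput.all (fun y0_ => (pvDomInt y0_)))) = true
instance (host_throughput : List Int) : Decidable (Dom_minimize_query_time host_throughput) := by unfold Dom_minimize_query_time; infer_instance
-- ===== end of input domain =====

-- B replaces A's binary search by the closed form max(host_throughput): every mid ≥ max is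
-- feasible for A's check (it never bounds the server count), so the search returns its lower bound.


-- ===== PORT A =====
-- is_feasible(max_query_time): loop over host_throughput with current_load
def pvFeas (xs : List Int) (maxq : Int) (cur : Int) : Bool :=
  match xs with
  | [] => true
  | t :: rest =>
      if t > maxq then false
      else if cur + t > maxq then pvFeas rest maxq t
      else pvFeas rest maxq (cur + t)

-- while left < right: mid = (left+right)//2; if feasible: right = mid else left = mid+1
def pvLoop (xs : List Int) (l r : Int) : Int :=
  if h : l < r then
    let mid := PySem.Int.floordiv (l + r) 2
    if pvFeas xs mid 0 then pvLoop xs l mid else pvLoop xs (mid + 1) r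
  else l
termination_by (r - l).toNat
decreasing_by
  · have := (PySem.Int.floordiv_two_mid_bounds (le_of_lt h)).1
    have h2 : PySem.Int.floordiv (l + r) 2 < r := by
      rw [PySem.Int.floordiv_eq_ediv_of_pos (by omega)]; omega
    simp only [mid] at *; omega
  · have h2 : l ≤ PySem.Int.floordiv (l + r) 2 := by
      rw [PySem.Int.floordiv_eq_ediv_of_pos (by omega)]; omega
    simp only [mid] at *; omega

def minimize_query_time (host_throughput : List Int) : Int :=
  match PySem.List.max? host_throughput (fun x => x) with
  | none => 0  -- max([]) raises ValueError in Python; excluded by Pre_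
  | some left => pvLoop host_throughput left (host_throughput.foldl (· + ·) 0)

-- ===== PORT B =====
def minimize_query_time_alt (host_throughput : List Int) : Int :=
  match PySem.List.max? host_throughput (fun x => x) with
  | none => 0  -- max([]) raises ValueError in Python; excluded by Pre_
  | some m => m

-- ===== PRECONDITION & SPEC =====
-- Both A (left = max(host_throughput)) and B (max(host_throughput)) raise ValueError on [].
def Pre_minimize_query_time (host_throughput : List Int) : Prop := host_throughput ≠ []
instance (host_throughput : List Int) : Decidable (Pre_minimize_query_time host_throughput) := by unfold Pre_minimize_query_time; infer_instance
def pvWitness_minimize_query_time : List Int := [3, 1, 4, 1, 5]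

def Spec_minimize_query_time (host_throughput : List Int) (out : Int) : Prop := out = minimize_query_time_alt host_throughput
instance (host_throughput : List Int) (out : Int) : Decidable (Spec_minimize_query_time host_throughput out) := by unfold Spec_minimize_query_time; infer_instance

-- ===== CLAIM (what is proved, stated in full; the proofs are below) =====
def Claim_equal_minimize_query_time : Prop := ∀ (host_throughput : List Int), Dom_minimize_query_time host_throughput → Pre_minimize_query_time host_throughput → Spec_minimize_query_time host_throughput (minimize_query_time host_throughput)

-- ===== LEMMAS AND PROOFS =====
-- A's feasibility check succeeds whenever every element is ≤ the candidate.
theorem pvFeas_of_all_le (xs : List Int) (maxq cur : Int)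
    (h : ∀ x ∈ xs, x ≤ maxq) : pvFeas xs maxq cur = true := by
  induction xs generalizing cur with
  | nil => rfl
  | cons t rest ih =>
    have ht : t ≤ maxq := h t (by simp)
    have hrest : ∀ x ∈ rest, x ≤ maxq := fun x hx => h x (by simp [hx])
    unfold pvFeas
    simp only [show ¬ t > maxq by omega, if_false]
    split <;> exact ih _ hrest

-- The binary search collapses to its lower bound when every element is ≤ it.
theorem pvLoop_eq (xs : List Int) (l : Int) (hall : ∀ x ∈ xs, x ≤ l) :
    ∀ r, pvLoop xs l r = l := by
  intro r
  by_cases h : l < r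
  · rw [pvLoop]
    simp only [h, dif_pos]
    have hmid := PySem.Int.floordiv_two_mid_bounds (le_of_lt h)
    have hfeas : pvFeas xs (PySem.Int.floordiv (l + r) 2) 0 = true :=
      pvFeas_of_all_le xs _ 0 (fun x hx => le_trans (hall x hx) hmid.1)
    rw [hfeas]
    simp only [if_true]
    exact pvLoop_eq xs l hall (PySem.Int.floordiv (l + r) 2)
  · rw [pvLoop]; simp [h]
termination_by r => (r - l).toNat
decreasing_by
  have h2 : PySem.Int.floordiv (l + r) 2 < r := by
    rw [PySem.Int.floordiv_eq_ediv_of_pos (by omega)]; omega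
  omega

-- ===== VERDICT (by name: the statement is the Claim_ definition above) =====
theorem minimize_query_time_spec : Claim_equal_minimize_query_time := by
  intro hs _ hpre
  unfold Spec_minimize_query_time minimize_query_time minimize_query_time_alt
  cases hmax : PySem.List.max? hs (fun x => x) with
  | none => rfl
  | some m =>
    exact pvLoop_eq hs m (fun x hx => PySem.List.max?_isMax hmax x hx) _
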